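-- pv_equiv track=rewrite | github.com/ucb-bar/autocomp | autocomp/agent_builder/built_agent.py | _parse_isa_subsections
-- ===== SOURCE A (Python) =====
-- def _parse_isa_subsections(sections: dict[str, str]) -> dict[str, dict[str, str]]:
--     """Parse ### subsections within each ## section.
--
--     Returns {section_name: {subsection_name: content}}.
--     """
--     result: dict[str, dict[str, str]] = {}
--     for sec_name, sec_text in sections.items():
--         subs: dict[str, str] = {}
--         cur_sub: str | None = None
--         cur_lines: list[str] = []
--         preamble_lines: list[str] = []
--
--         for line in sec_text.split("\n"):
--             if line.startswith("### "):
--                 if cur_sub is not None: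
--                     block = "\n".join(cur_lines).strip()
--                     if cur_sub in subs:
--                         subs[cur_sub] += "\n\n" + block
--                     else:
--                         subs[cur_sub] = block
--                 cur_sub = line[4:].strip()
--                 cur_lines = [line]
--             elif cur_sub is not None:
--                 cur_lines.append(line)
--             else:
--                 preamble_lines.append(line)
--
--         if cur_sub is not None:
--             block = "\n".join(cur_lines).strip()
--             if cur_sub in subs:
--                 subs[cur_sub] += "\n\n" + block
--             else:
--                 subs[cur_sub] = block
--         if preamble_lines:
--             preamble = "\n".join(preamble_lines).strip()
--             if preamble:
--                 subs["_preamble"] = preamble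
--
--         result[sec_name] = subs
--     return result
-- ===== SOURCE B (Python) =====
-- def _parse_isa_subsections(sections: dict[str, str]) -> dict[str, dict[str, str]]:
--     """Parse ### subsections within each ## section (split-at-header decomposition).
--
--     Returns {section_name: {subsection_name: content}}.
--     """
--     result: dict[str, dict[str, str]] = {}
--     for sec_name, sec_text in sections.items():
--         lines = sec_text.split("\n")
--         # preamble = lines before the first '### ' header
--         pre = []
--         rest = lines
--         while rest and not rest[0].startswith("### "):
--             pre.append(rest[0])
--             rest = rest[1:]
--         subs: dict[str, str] = {}
--         # each block: a header line plus the lines up to the next header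
--         while rest:
--             header, rest = rest[0], rest[1:]
--             body = []
--             while rest and not rest[0].startswith("### "):
--                 body.append(rest[0])
--                 rest = rest[1:]
--             name = header[4:].strip()
--             block = "\n".join([header] + body).strip()
--             if name in subs:
--                 subs[name] += "\n\n" + block
--             else:
--                 subs[name] = block
--         p = "\n".join(pre).strip()
--         if p:
--             subs["_preamble"] = p
--         result[sec_name] = subs
--     return result
-- ===== Notes on version B (the rewrite author's own statement) =====
-- stated objective: alternative
-- what changed: Replaces A's line-by-line state machine (current-subsection/pending-lines accumulators) by a split-at-header decomposition: peel off the preamble prefix, then repeatedly slice one header-plus-body block off the remaining lines.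
import Mathlib
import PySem

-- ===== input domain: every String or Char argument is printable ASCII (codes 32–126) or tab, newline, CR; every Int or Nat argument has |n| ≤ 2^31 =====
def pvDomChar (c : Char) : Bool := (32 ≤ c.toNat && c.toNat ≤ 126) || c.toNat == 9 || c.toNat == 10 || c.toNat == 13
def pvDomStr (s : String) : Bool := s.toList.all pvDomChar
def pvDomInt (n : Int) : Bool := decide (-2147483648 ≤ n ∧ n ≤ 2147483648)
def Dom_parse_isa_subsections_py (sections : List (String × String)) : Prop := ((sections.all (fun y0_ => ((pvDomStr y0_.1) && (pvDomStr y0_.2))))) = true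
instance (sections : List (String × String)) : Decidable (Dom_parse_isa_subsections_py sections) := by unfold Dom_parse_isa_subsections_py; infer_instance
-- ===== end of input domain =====

-- B replaces A's line-by-line state machine with a split-at-header decomposition; same cost; return value only.

-- shared exact primitives: Python's  a + b  on str and  s.split("\n")
def pvCat (a b : String) : String := PySem.Str.join "" [a, b]
def pvSplitNL (t : String) : List String := (PySem.Chars.splitOn t.toList ['\n']).map String.ofList

-- ===== PORT A =====
-- the duplicated flush snippet of A: add (cur_sub, "\n".join(cur_lines).strip()) to subs
def pvFlushA (subs : PySem.Dict String String) (cur : String) (curLines : List String) : PySem.Dict String String :=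
  let block := PySem.Str.strip (PySem.Str.join "\n" curLines)
  if subs.contains cur then subs.insert cur (pvCat (subs.getD cur "") (pvCat "\n\n" block))
  else subs.insert cur block

-- one iteration of A's inner for-loop; state = (subs, cur_sub, cur_lines, preamble_lines)
def pvStepA (st : PySem.Dict String String × Option String × List String × List String)
    (line : String) : PySem.Dict String String × Option String × List String × List String :=
  if PySem.Str.startswith line "### " then
    let subs := match st.2.1 with
      | some cur => pvFlushA st.1 cur st.2.2.1
      | none => st.1
    (subs, some (PySem.Str.strip (PySem.Str.slice line (some 4) none)), [line], st.2.2.2)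
  else
    match st.2.1 with
    | some _ => (st.1, st.2.1, st.2.2.1 ++ [line], st.2.2.2)
    | none => (st.1, st.2.1, st.2.2.1, st.2.2.2 ++ [line])

-- A's body for one section
def pvSectionA (secText : String) : List (String × String) :=
  let st := (pvSplitNL secText).foldl pvStepA (PySem.Dict.empty, none, [], [])
  let subs := match st.2.1 with
    | some cur => pvFlushA st.1 cur st.2.2.1
    | none => st.1
  let subs := if st.2.2.2 ≠ [] then
      let preamble := PySem.Str.strip (PySem.Str.join "\n" st.2.2.2)
      if preamble ≠ "" then subs.insert "_preamble" preamble else subs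
    else subs
  subs.items

def parse_isa_subsections_py (sections : List (String × String)) : List (String × List (String × String)) :=
  (sections.foldl (fun result p => result.insert p.1 (pvSectionA p.2)) PySem.Dict.empty).items

-- ===== PORT B =====
def pvHdr (line : String) : Bool := PySem.Str.startswith line "### "

-- Source B's 'while rest and not rest[0].startswith("### "): out.append(rest[0]); rest = rest[1:]'
def pvSpanB (acc : List String) : List String → List String × List String
  | [] => (acc, [])
  | l :: ls => if pvHdr l then (acc, l :: ls) else pvSpanB (acc ++ [l]) ls

theorem pvSpanB_snd_len_le (acc : List String) (ls : List String) : (pvSpanB acc ls).2.length ≤ ls.length := by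
  induction ls generalizing acc with
  | nil => simp [pvSpanB]
  | cons l ls ih =>
    simp only [pvSpanB]
    split
    · simp
    · exact le_trans (ih _) (by simp)

-- Source B's add-block snippet
def pvAddB (subs : PySem.Dict String String) (header : String) (body : List String) : PySem.Dict String String :=
  let name := PySem.Str.strip (PySem.Str.slice header (some 4) none)
  let block := PySem.Str.strip (PySem.Str.join "\n" ([header] ++ body))
  if subs.contains name then subs.insert name (pvCat (subs.getD name "") (pvCat "\n\n" block))
  else subs.insert name block

-- Source B's 'while rest:' block loop
def pvBlocksB (subs : PySem.Dict String String) : List String → PySem.Dict String String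
  | [] => subs
  | h :: rest =>
    let s := pvSpanB [] rest
    pvBlocksB (pvAddB subs h s.1) s.2
termination_by ls => ls.length
decreasing_by
  simp only [List.length_cons]
  exact Nat.lt_succ_of_le (pvSpanB_snd_len_le [] rest)

-- B's body for one section
def pvSectionB (secText : String) : List (String × String) :=
  let lines := pvSplitNL secText
  let s := pvSpanB [] lines
  let subs := pvBlocksB PySem.Dict.empty s.2
  let p := PySem.Str.strip (PySem.Str.join "\n" s.1)
  let subs := if p ≠ "" then subs.insert "_preamble" p else subs
  subs.items

def parse_isa_subsections_py_alt (sections : List (String × String)) : List (String × List (String × String)) :=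
  (sections.foldl (fun result p => result.insert p.1 (pvSectionB p.2)) PySem.Dict.empty).items

-- ===== PRECONDITION & SPEC =====
def Spec_parse_isa_subsections_py (sections : List (String × String)) (out : List (String × List (String × String))) : Prop := out = parse_isa_subsections_py_alt sections
instance (sections : List (String × String)) (out : List (String × List (String × String))) : Decidable (Spec_parse_isa_subsections_py sections out) := by unfold Spec_parse_isa_subsections_py; infer_instance

-- ===== CLAIM (what is proved, stated in full; the proofs are below) =====
def Claim_equal_parse_isa_subsections_py : Prop := ∀ (sections : List (String × String)), Dom_parse_isa_subsections_py sections → Spec_parse_isa_subsections_py sections (parse_isa_subsections_py sections)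

-- ===== LEMMAS AND PROOFS =====

def pvNotHdr (l : String) : Bool := !pvHdr l

-- A's trailing flush, as a function of the final loop state
def pvFinish (subs : PySem.Dict String String) (cur? : Option String) (cl : List String) : PySem.Dict String String :=
  match cur? with
  | some cur => pvFlushA subs cur cl
  | none => subs

-- A's preamble finalisation
def pvFinalA (subs : PySem.Dict String String) (pl : List String) : PySem.Dict String String :=
  if pl ≠ [] then
    let preamble := PySem.Str.strip (PySem.Str.join "\n" pl)
    if preamble ≠ "" then subs.insert "_preamble" preamble else subs
  else subs

theorem pvStepA_hdr (subs : PySem.Dict String String) (cur? : Option String) (cl pl : List String)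
    (l : String) (h : pvHdr l = true) :
    pvStepA (subs, cur?, cl, pl) l
      = (pvFinish subs cur? cl, some (PySem.Str.strip (PySem.Str.slice l (some 4) none)), [l], pl) := by
  unfold pvHdr at h
  simp only [PySem.Str.startswith_eq] at h
  replace h : PySem.Chars.startswith l.toList ['#', '#', '#', ' '] = true := h
  cases cur? <;> simp [pvStepA, pvFinish, h]

theorem pvStepA_some (subs : PySem.Dict String String) (name : String) (cl pl : List String)
    (l : String) (h : pvHdr l = false) :
    pvStepA (subs, some name, cl, pl) l = (subs, some name, cl ++ [l], pl) := by
  unfold pvHdr at h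
  simp only [PySem.Str.startswith_eq] at h
  replace h : PySem.Chars.startswith l.toList ['#', '#', '#', ' '] = false := h
  simp [pvStepA, h]

theorem pvStepA_none (subs : PySem.Dict String String) (cl pl : List String)
    (l : String) (h : pvHdr l = false) :
    pvStepA (subs, none, cl, pl) l = (subs, none, cl, pl ++ [l]) := by
  unfold pvHdr at h
  simp only [PySem.Str.startswith_eq] at h
  replace h : PySem.Chars.startswith l.toList ['#', '#', '#', ' '] = false := h
  simp [pvStepA, h]

theorem pvBlocksB_nil (subs : PySem.Dict String String) : pvBlocksB subs [] = subs := by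
  conv_lhs => rw [pvBlocksB.eq_def]

theorem pvBlocksB_cons (subs : PySem.Dict String String) (h : String) (rest : List String) :
    pvBlocksB subs (h :: rest) = pvBlocksB (pvAddB subs h (pvSpanB [] rest).1) (pvSpanB [] rest).2 := by
  conv_lhs => rw [pvBlocksB.eq_def]

theorem pvSpanB_eq (acc ls : List String) :
    pvSpanB acc ls = (acc ++ ls.takeWhile pvNotHdr, ls.dropWhile pvNotHdr) := by
  induction ls generalizing acc with
  | nil => simp [pvSpanB]
  | cons l ls ih =>
    cases h : pvHdr l with
    | true => simp [pvSpanB, pvNotHdr, h]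
    | false => simp [pvSpanB, pvNotHdr, h, ih]

theorem pvAddB_eq (subs : PySem.Dict String String) (h : String) (body : List String) :
    pvAddB subs h body = pvFlushA subs (PySem.Str.strip (PySem.Str.slice h (some 4) none)) (h :: body) := rfl

theorem pvTakeWhile_cons_t {l : String} (ls : List String) (h : pvHdr l = true) :
    List.takeWhile pvNotHdr (l :: ls) = [] := by simp [pvNotHdr, h]
theorem pvDropWhile_cons_t {l : String} (ls : List String) (h : pvHdr l = true) :
    List.dropWhile pvNotHdr (l :: ls) = l :: ls := by simp [pvNotHdr, h]
theorem pvTakeWhile_cons_f {l : String} (ls : List String) (h : pvHdr l = false) :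
    List.takeWhile pvNotHdr (l :: ls) = l :: List.takeWhile pvNotHdr ls := by
  simp [pvNotHdr, h]
theorem pvDropWhile_cons_f {l : String} (ls : List String) (h : pvHdr l = false) :
    List.dropWhile pvNotHdr (l :: ls) = List.dropWhile pvNotHdr ls := by
  simp [pvNotHdr, h]

-- some-phase: once a current subsection exists, A's fold equals B's block loop (and preamble_lines is frozen)
theorem pvSome_phase (ls : List String) (subs : PySem.Dict String String) (name : String)
    (cl pl : List String) :
    (pvFinish (ls.foldl pvStepA (subs, some name, cl, pl)).1
        (ls.foldl pvStepA (subs, some name, cl, pl)).2.1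
        (ls.foldl pvStepA (subs, some name, cl, pl)).2.2.1
      = pvBlocksB (pvFlushA subs name (cl ++ ls.takeWhile pvNotHdr)) (ls.dropWhile pvNotHdr))
    ∧ (ls.foldl pvStepA (subs, some name, cl, pl)).2.2.2 = pl := by
  induction ls generalizing subs name cl with
  | nil => simp [pvFinish, pvBlocksB_nil]
  | cons l ls ih =>
    cases h : pvHdr l with
    | false =>
      rw [List.foldl_cons, pvStepA_some subs name cl pl l h,
        pvTakeWhile_cons_f ls h, pvDropWhile_cons_f ls h]
      have := ih subs name (cl ++ [l])
      simpa [List.append_assoc] using this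
    | true =>
      rw [List.foldl_cons, pvStepA_hdr subs (some name) cl pl l h,
        pvTakeWhile_cons_t ls h, pvDropWhile_cons_t ls h, List.append_nil]
      have := ih (pvFinish subs (some name) cl) (PySem.Str.strip (PySem.Str.slice l (some 4) none)) [l]
      rw [this.1, this.2]
      refine ⟨?_, rfl⟩
      rw [pvBlocksB_cons, pvSpanB_eq, pvAddB_eq]
      simp [pvFinish]

-- none-phase: the preamble phase of A's fold; together they equal B's whole section computation
theorem pvNone_phase (ls : List String) (subs : PySem.Dict String String) (cl pl : List String) :
    pvFinalA
        (pvFinish (ls.foldl pvStepA (subs, none, cl, pl)).1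
          (ls.foldl pvStepA (subs, none, cl, pl)).2.1
          (ls.foldl pvStepA (subs, none, cl, pl)).2.2.1)
        (ls.foldl pvStepA (subs, none, cl, pl)).2.2.2
      = pvFinalA (pvBlocksB subs (ls.dropWhile pvNotHdr)) (pl ++ ls.takeWhile pvNotHdr) := by
  induction ls generalizing cl pl with
  | nil => simp [pvFinish, pvBlocksB_nil]
  | cons l ls ih =>
    cases h : pvHdr l with
    | false =>
      rw [List.foldl_cons, pvStepA_none subs cl pl l h,
        pvTakeWhile_cons_f ls h, pvDropWhile_cons_f ls h]
      simpa [List.append_assoc] using ih cl (pl ++ [l])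
    | true =>
      rw [List.foldl_cons, pvStepA_hdr subs none cl pl l h,
        pvTakeWhile_cons_t ls h, pvDropWhile_cons_t ls h, List.append_nil]
      have hs := pvSome_phase ls (pvFinish subs none cl)
        (PySem.Str.strip (PySem.Str.slice l (some 4) none)) [l] pl
      rw [hs.1, hs.2]
      rw [pvBlocksB_cons, pvSpanB_eq, pvAddB_eq]
      simp [pvFinish]

-- B's finalisation agrees with A's: with no preamble lines the stripped join is empty anyway
theorem pvFinalB_eq (subs : PySem.Dict String String) (pl : List String) :
    pvFinalA subs pl
      = (if PySem.Str.strip (PySem.Str.join "\n" pl) ≠ "" then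
           subs.insert "_preamble" (PySem.Str.strip (PySem.Str.join "\n" pl)) else subs) := by
  cases pl with
  | nil =>
    have he : PySem.Str.strip (PySem.Str.join "\n" ([] : List String)) = "" := by decide
    simp [pvFinalA, he]
  | cons a l => simp [pvFinalA]

theorem pvSection_eq (t : String) : pvSectionA t = pvSectionB t := by
  have hB : pvSectionB t
      = (if PySem.Str.strip (PySem.Str.join "\n" (pvSpanB [] (pvSplitNL t)).1) ≠ "" then
           (pvBlocksB PySem.Dict.empty (pvSpanB [] (pvSplitNL t)).2).insert "_preamble"
             (PySem.Str.strip (PySem.Str.join "\n" (pvSpanB [] (pvSplitNL t)).1))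
         else pvBlocksB PySem.Dict.empty (pvSpanB [] (pvSplitNL t)).2).items := rfl
  have hA : pvSectionA t
      = (pvFinalA
          (pvFinish ((pvSplitNL t).foldl pvStepA (PySem.Dict.empty, none, [], [])).1
            ((pvSplitNL t).foldl pvStepA (PySem.Dict.empty, none, [], [])).2.1
            ((pvSplitNL t).foldl pvStepA (PySem.Dict.empty, none, [], [])).2.2.1)
          ((pvSplitNL t).foldl pvStepA (PySem.Dict.empty, none, [], [])).2.2.2).items := by
    unfold pvSectionA pvFinalA pvFinish
    rfl
  rw [hA, hB, pvSpanB_eq, List.nil_append, ← pvFinalB_eq]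
  have := pvNone_phase (pvSplitNL t) PySem.Dict.empty [] []
  rw [this, List.nil_append]

-- ===== VERDICT (by name: the statement is the Claim_ definition above) =====
theorem parse_isa_subsections_py_spec : Claim_equal_parse_isa_subsections_py := by
  intro sections _
  unfold Spec_parse_isa_subsections_py parse_isa_subsections_py parse_isa_subsections_py_alt
  have hf : pvSectionA = pvSectionB := funext pvSection_eq
  simp only [hf]
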